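-- pv_equiv track=rewrite | github.com/ElliotVilhelm/IZII | Engine.py | sq120_sq64
-- ===== SOURCE A (Python) =====
-- def sq120_sq64(sq):
-- 	sq120 = []
-- 	for i in range(120):
-- 		# if i < 21:
-- 		# 	sq120.append(-1)
-- 		# if i > 100:
-- 		# 	sq120.append(-1)
-- 		# else:
-- 		sq120.append(-1)
-- 	skip = 0
-- 	for i in range(20, 100):
-- 		if i % 10 != 0 and (i -9) % 10 != 0:
-- 			sq120[i] = i - 20 - skip
-- 		if i % 10 == 0 and i != 20:
-- 			skip += 2
-- 	return sq120[sq]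
-- ===== SOURCE B (Python) =====
-- def sq120_sq64(sq):
--     idx = sq + 120 if sq < 0 else sq
--     rank, file = divmod(idx, 10)
--     if 2 <= rank <= 9 and 1 <= file <= 8:
--         return (rank - 2) * 8 + file
--     return -1
-- ===== Notes on version B (the rewrite author's own statement) =====
-- stated objective: simpler
-- what changed: B computes the sq64 index arithmetically from rank=idx//10 and file=idx%10 (after Python's negative-index adjustment) instead of building and indexing a 120-element table with a running skip counter.
import Mathlib
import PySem

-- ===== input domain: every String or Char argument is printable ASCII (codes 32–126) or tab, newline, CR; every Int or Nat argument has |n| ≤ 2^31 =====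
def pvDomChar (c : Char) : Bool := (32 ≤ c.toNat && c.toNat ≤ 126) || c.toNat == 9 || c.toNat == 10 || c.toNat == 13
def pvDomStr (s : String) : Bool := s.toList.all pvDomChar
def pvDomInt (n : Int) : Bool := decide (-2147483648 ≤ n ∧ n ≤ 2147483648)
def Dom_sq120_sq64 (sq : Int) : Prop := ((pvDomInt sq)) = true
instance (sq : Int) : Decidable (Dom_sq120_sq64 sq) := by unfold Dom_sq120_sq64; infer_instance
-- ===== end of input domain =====

-- B replaces A's per-call 120-element table (with a running skip counter) by direct rank/file arithmetic: simpler.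


-- ===== PORT A =====
-- literal port: build a 120-list of -1, then fill indices 20..99 with i-20-skip, then sq120[sq]
def sq120_sq64 (sq : Int) : Int :=
  let sq120 : List Int := (PySem.List.pyRange 0 120 1).foldl (fun acc _ => acc ++ [(-1 : Int)]) []
  let st := (PySem.List.pyRange 20 100 1).foldl (fun (st : List Int × Int) i =>
    let l := if PySem.Int.mod i 10 ≠ 0 ∧ PySem.Int.mod (i - 9) 10 ≠ 0 then
               PySem.List.pySetD st.1 i (i - 20 - st.2) else st.1
    let sk := if PySem.Int.mod i 10 = 0 ∧ i ≠ 20 then st.2 + 2 else st.2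
    (l, sk)) (sq120, 0)
  (PySem.List.pyGet? st.1 sq).getD 0   -- none = IndexError, excluded by Pre_

-- ===== PORT B =====
def sq120_sq64_alt (sq : Int) : Int :=
  let idx := if sq < 0 then sq + 120 else sq
  let rank := PySem.Int.floordiv idx 10
  let file := PySem.Int.mod idx 10
  if 2 ≤ rank ∧ rank ≤ 9 ∧ 1 ≤ file ∧ file ≤ 8 then (rank - 2) * 8 + file else -1

-- ===== PRECONDITION & SPEC =====
-- Pre_ excludes exactly the indices on which A's list indexing raises IndexError
def Pre_sq120_sq64 (sq : Int) : Prop := -120 ≤ sq ∧ sq < 120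
instance (sq : Int) : Decidable (Pre_sq120_sq64 sq) := by unfold Pre_sq120_sq64; infer_instance
def pvWitness_sq120_sq64 : Int := 0

def Spec_sq120_sq64 (sq : Int) (out : Int) : Prop := out = sq120_sq64_alt sq
instance (sq : Int) (out : Int) : Decidable (Spec_sq120_sq64 sq out) := by unfold Spec_sq120_sq64; infer_instance

-- ===== CLAIM (what is proved, stated in full; the proofs are below) =====
def Claim_equal_sq120_sq64 : Prop := ∀ (sq : Int), Dom_sq120_sq64 sq → Pre_sq120_sq64 sq → Spec_sq120_sq64 sq (sq120_sq64 sq)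

-- ===== LEMMAS AND PROOFS =====
-- pointwise equality on the 240 admissible indices, checked by the kernel
set_option maxRecDepth 4096 in
lemma pv_key : ∀ n : Nat, n < 240 → sq120_sq64 ((n : Int) - 120) = sq120_sq64_alt ((n : Int) - 120) := by decide

-- ===== VERDICT (by name: the statement is the Claim_ definition above) =====
theorem sq120_sq64_spec : Claim_equal_sq120_sq64 := by
  intro sq _ hpre
  unfold Spec_sq120_sq64
  obtain ⟨h1, h2⟩ := hpre
  have hn : sq = ((sq + 120).toNat : Int) - 120 := by omega
  have hlt : (sq + 120).toNat < 240 := by omega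
  rw [hn]
  exact pv_key _ hlt
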